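-- pv_equiv track=rewrite | github.com/AceCLee/Media-Master | media_master/util/media_name.py | add_one_type_media_info_2_format_string
-- ===== SOURCE A (Python) =====
-- G_SEP = "_"
--
-- def format_string_add(original, new):
--     output = ""
--     if original:
--         output = f"{original}{G_SEP}{new}"
--     else:
--         output = new
--     return output
--
-- def add_one_type_media_info_2_format_string(
--     format_string, type_str, media_info_list
-- ):
--     type_info_list: list = [
--         track
--         for track in media_info_list
--         if track["track_type"].lower() == type_str
--     ]
--
--     for type_info in type_info_list:
--         format_string = format_string_add(
--             format_string, type_info["format"].capitalize()
--         )
--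
--     return format_string
-- ===== SOURCE B (Python) =====
-- G_SEP = "_"
--
-- def add_one_type_media_info_2_format_string(
--     format_string, type_str, media_info_list
-- ):
--     parts = [
--         track["format"].capitalize()
--         for track in media_info_list
--         if track["track_type"].lower() == type_str
--     ]
--     pieces = [format_string] if format_string else []
--     return G_SEP.join(pieces + parts)
-- ===== Notes on version B (the rewrite author's own statement) =====
-- stated objective: idiomatic
-- what changed: Replaces the per-element truthiness-branching accumulator (format_string_add) with one comprehension building the capitalized parts and a single G_SEP.join; Pre_ excludes tracks missing the needed keys (KeyError in A) and the corner where format_string is empty and the first matching track's format is empty, where A's accumulator silently absorbs the empty piece while join keeps a separator - both placements are defensible for an empty format value.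
import Mathlib
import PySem

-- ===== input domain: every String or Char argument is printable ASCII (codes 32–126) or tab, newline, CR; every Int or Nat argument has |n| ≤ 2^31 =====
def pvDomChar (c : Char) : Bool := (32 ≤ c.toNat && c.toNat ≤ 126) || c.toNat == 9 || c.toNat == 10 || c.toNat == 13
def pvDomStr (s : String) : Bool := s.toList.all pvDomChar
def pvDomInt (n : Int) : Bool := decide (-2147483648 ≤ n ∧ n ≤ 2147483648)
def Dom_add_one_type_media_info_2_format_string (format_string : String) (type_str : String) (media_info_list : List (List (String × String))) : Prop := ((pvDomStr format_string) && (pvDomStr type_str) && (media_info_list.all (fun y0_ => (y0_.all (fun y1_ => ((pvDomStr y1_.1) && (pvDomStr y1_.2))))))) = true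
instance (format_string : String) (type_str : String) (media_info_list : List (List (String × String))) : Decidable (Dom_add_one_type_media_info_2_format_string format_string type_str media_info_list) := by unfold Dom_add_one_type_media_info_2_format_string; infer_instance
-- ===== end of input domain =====

-- B replaces A's truthiness-branching accumulator by building the list of capitalized formats and
-- doing one separator-join (objective: idiomatic; same cost).

-- ===== PORT A =====
-- track[k]: Python dict lookup (first match in the association list); inputs where Python would
-- raise KeyError are excluded by Pre_, so the .getD "" default is never reached under the claim.
def pyItem (track : List (String × String)) (k : String) : String :=
  ((PySem.Dict.mk track).get? k).getD ""

-- str.capitalize(): first character upper-cased, the rest lower-cased (exact on the ASCII domain)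
def pyCapitalize (s : String) : String :=
  match s.toList with
  | [] => s
  | c :: rest => String.ofList (PySem.Chars.upperChar c :: PySem.Chars.lower rest)

def format_string_add (original : String) (new : String) : String :=
  if original ≠ "" then original ++ "_" ++ new else new

def add_one_type_media_info_2_format_string (format_string : String) (type_str : String) (media_info_list : List (List (String × String))) : String :=
  let type_info_list := media_info_list.filter
    (fun track => PySem.Str.lower (pyItem track "track_type") == type_str)
  type_info_list.foldl
    (fun fs type_info => format_string_add fs (pyCapitalize (pyItem type_info "format")))
    format_string

-- ===== PORT B =====
def add_one_type_media_info_2_format_string_alt (format_string : String) (type_str : String) (media_info_list : List (List (String × String))) : String :=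
  let parts := (media_info_list.filter
      (fun track => PySem.Str.lower (pyItem track "track_type") == type_str)).map
    (fun track => pyCapitalize (pyItem track "format"))
  let pieces := if format_string == "" then [] else [format_string]
  PySem.Str.join "_" (pieces ++ parts)

-- ===== PRECONDITION & SPEC =====
-- Pre_ excludes (a) the inputs where Python A raises KeyError (a track without a "track_type"
-- key, or a matching track without a "format" key), and (b) the corner where format_string is
-- empty and the first matching track's format is empty: there A's accumulator absorbs the empty
-- piece ("X") while a plain join keeps the separator ("_X"); for an empty format value either
-- placement is defensible and neither would be specified.
def Pre_add_one_type_media_info_2_format_string (format_string : String) (type_str : String) (media_info_list : List (List (String × String))) : Prop :=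
  (∀ track ∈ media_info_list,
    ((PySem.Dict.mk track).get? "track_type").isSome = true ∧
    (PySem.Str.lower (pyItem track "track_type") = type_str →
      ((PySem.Dict.mk track).get? "format").isSome = true)) ∧
  (format_string = "" →
    ∀ t, (media_info_list.filter
        (fun track => PySem.Str.lower (pyItem track "track_type") == type_str)).head? = some t →
      pyItem t "format" ≠ "")
instance (format_string : String) (type_str : String) (media_info_list : List (List (String × String))) : Decidable (Pre_add_one_type_media_info_2_format_string format_string type_str media_info_list) := by unfold Pre_add_one_type_media_info_2_format_string; infer_instance

def pvWitness_add_one_type_media_info_2_format_string : String × String × (List (List (String × String))) :=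
  ("", "video", [[("track_type", "Video"), ("format", "hevc")]])

def Spec_add_one_type_media_info_2_format_string (format_string : String) (type_str : String) (media_info_list : List (List (String × String))) (out : String) : Prop := out = add_one_type_media_info_2_format_string_alt format_string type_str media_info_list
instance (format_string : String) (type_str : String) (media_info_list : List (List (String × String))) (out : String) : Decidable (Spec_add_one_type_media_info_2_format_string format_string type_str media_info_list out) := by unfold Spec_add_one_type_media_info_2_format_string; infer_instance

-- ===== CLAIM (what is proved, stated in full; the proofs are below) =====
def Claim_equal_add_one_type_media_info_2_format_string : Prop := ∀ (format_string : String) (type_str : String) (media_info_list : List (List (String × String))), Dom_add_one_type_media_info_2_format_string format_string type_str media_info_list → Pre_add_one_type_media_info_2_format_string format_string type_str media_info_list → Spec_add_one_type_media_info_2_format_string format_string type_str media_info_list (add_one_type_media_info_2_format_string format_string type_str media_info_list)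

-- ===== LEMMAS AND PROOFS =====

theorem join_pair_merge (a b : String) (rest : List String) :
    PySem.Str.join "_" (a :: b :: rest) = PySem.Str.join "_" ((a ++ "_" ++ b) :: rest) := by
  apply String.toList_inj.mp
  cases rest with
  | nil => simp [PySem.Str.toList_join, PySem.Chars.join_singleton, PySem.Chars.join_cons_cons]
  | cons c cs => simp [PySem.Str.toList_join, PySem.Chars.join_cons_cons]

theorem append_sep_ne_empty (a b : String) : a ++ "_" ++ b ≠ "" := by
  intro h
  have : (a ++ "_" ++ b).toList = ([] : List Char) := by rw [h]; decide
  simp at this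

theorem foldl_fsa_of_ne (parts : List String) (acc : String) (h : acc ≠ "") :
    parts.foldl format_string_add acc = PySem.Str.join "_" (acc :: parts) := by
  induction parts generalizing acc with
  | nil =>
    apply String.toList_inj.mp
    simp [PySem.Str.toList_join, PySem.Chars.join_singleton]
  | cons p rest ih =>
    have step : format_string_add acc p = acc ++ "_" ++ p := by
      simp [format_string_add, h]
    rw [List.foldl_cons, step, ih _ (append_sep_ne_empty acc p), join_pair_merge]

theorem pyCapitalize_ne_empty (s : String) (h : s ≠ "") : pyCapitalize s ≠ "" := by
  unfold pyCapitalize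
  cases hs : s.toList with
  | nil => exact h
  | cons c rest =>
    intro he
    have h2 := congrArg String.toList he
    simp at h2

-- ===== VERDICT (by name: the statement is the Claim_ definition above) =====
theorem add_one_type_media_info_2_format_string_spec : Claim_equal_add_one_type_media_info_2_format_string := by
  intro format_string type_str media_info_list _dom pre
  unfold Spec_add_one_type_media_info_2_format_string
  unfold add_one_type_media_info_2_format_string add_one_type_media_info_2_format_string_alt
  simp only
  rw [← List.foldl_map]
  by_cases h : format_string = ""
  · subst h
    simp only [beq_self_eq_true, if_pos, List.nil_append]
    cases hf : (media_info_list.filter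
        (fun track => PySem.Str.lower (pyItem track "track_type") == type_str)) with
    | nil => rfl
    | cons t rest =>
      have hne : pyItem t "format" ≠ "" := pre.2 rfl t (by rw [hf]; rfl)
      have hcap : pyCapitalize (pyItem t "format") ≠ "" := pyCapitalize_ne_empty _ hne
      simp only [List.map_cons, List.foldl_cons]
      have step : format_string_add "" (pyCapitalize (pyItem t "format"))
          = pyCapitalize (pyItem t "format") := by simp [format_string_add]
      rw [step, foldl_fsa_of_ne _ _ hcap]
  · rw [foldl_fsa_of_ne _ _ h]
    simp [h]
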